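-- pv_equiv track=rewrite | github.com/ddw02141/CS492-MLNLP | 2_bow_classification/bow_classification_with_sklearn.py | preprocess_and_split_to_tokens
-- ===== SOURCE A (Python) =====
-- def preprocess_and_split_to_tokens(sentences):
--     """
--     :param sentences: (array_like) array_like objects of strings.
--         e.g., ["I like apples", "I love python3"]
--     You can choose the level of pre-processing by yourself.
--     The easiest way to start is lowering the case (str.lower).
--
--     :return: array_like objects of array_like objects of tokens.
--         e.g., [["I", "like", "apples"], ["I", "love", "python3"]]
--     """
--     punct_mapping = {"_":" ", "'":" "}
--     punct = "/-'?!.,#$%\'()*+-/:;<=>@[\\]^_`{|}~" + '""“”’'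
--     def clean_special_chars(text, punct, mapping):
--         for p in punct:
--             text = text.replace(p, f' {p} ')
--         for m in mapping:
--             text = text.replace(m, mapping[m])
--         return text
--
--     tokenized_sentences = []
--
--     for sentence in sentences:
--         sentence = sentence.lower()
--         modified_sentence = clean_special_chars(sentence,punct,punct_mapping)
--         tokenized_sentence = modified_sentence.split()
--         tokenized_sentences.append(tokenized_sentence)
--
--     return tokenized_sentences
-- ===== SOURCE B (Python) =====
-- def preprocess_and_split_to_tokens(sentences):
--     # One-pass scanner: _ and ' act as separators; other punctuation chars
--     # become one-character tokens; whitespace separates; everything lowercased.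
--     seps = {'_', "'"}
--     punct = set('/-?!.,#$%()*+:;<=>@[\\]^`{|}~"\u201c\u201d\u2019') - seps
--     tokenized_sentences = []
--     for sentence in sentences:
--         tokens = []
--         buf = []
--         for c in sentence.lower():
--             if c.isspace() or c in seps:
--                 if buf:
--                     tokens.append(''.join(buf))
--                     buf = []
--             elif c in punct:
--                 if buf:
--                     tokens.append(''.join(buf))
--                     buf = []
--                 tokens.append(c)
--             else:
--                 buf.append(c)
--         if buf:
--             tokens.append(''.join(buf))
--         tokenized_sentences.append(tokens)
--     return tokenized_sentences
-- ===== Notes on version B (the rewrite author's own statement) =====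
-- stated objective: faster
-- what changed: A rewrites each whole sentence 37 times (one str.replace pass per punctuation character, then the mapping passes) before splitting; B makes a single character-by-character scan per sentence with a token buffer, treating _ and ' as separators and the other punctuation characters as one-character tokens.
import Mathlib
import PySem

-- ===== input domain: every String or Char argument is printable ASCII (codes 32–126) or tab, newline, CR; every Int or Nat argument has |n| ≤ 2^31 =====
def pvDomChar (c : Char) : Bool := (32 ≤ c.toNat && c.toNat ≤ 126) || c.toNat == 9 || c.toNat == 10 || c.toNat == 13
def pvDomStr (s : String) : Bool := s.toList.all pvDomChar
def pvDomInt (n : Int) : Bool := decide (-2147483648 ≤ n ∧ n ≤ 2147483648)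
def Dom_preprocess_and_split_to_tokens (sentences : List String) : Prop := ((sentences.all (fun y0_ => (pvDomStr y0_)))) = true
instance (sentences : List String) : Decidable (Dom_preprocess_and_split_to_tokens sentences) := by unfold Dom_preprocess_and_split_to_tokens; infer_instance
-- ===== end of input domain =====

-- B replaces A's 37 whole-string replace passes per sentence with a single character scan
-- (objective: faster, one pass instead of repeated full-string rewrites).

-- ===== PORT A =====
-- the Python constant punct (the ASCII part plus the smart quotes), in order, duplicates kept
def pyPunct : List Char := "/-'?!.,#$%'()*+-/:;<=>@[\\]^_`{|}~\"\"“”’".toList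
-- the dict punct_mapping as an association list in insertion order
def pyMapping : List (List Char × List Char) := [(['_'], [' ']), (['\''], [' '])]

def cleanSpecialChars (text : List Char) : List Char :=
  let t1 := pyPunct.foldl (fun t p => PySem.Chars.replace t [p] [' ', p, ' ']) text
  pyMapping.foldl (fun t pr => PySem.Chars.replace t pr.1 pr.2) t1

def preprocess_and_split_to_tokens (sentences : List String) : List (List String) :=
  sentences.foldl (fun acc s =>
    acc ++ [(PySem.Chars.split₀ (cleanSpecialChars (PySem.Chars.lower s.toList))).map String.ofList]) []

-- ===== PORT B =====
def pvSeps : List Char := ['_', '\'']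
def pvPunctTok : List Char := "/-?!.,#$%()*+:;<=>@[\\]^`{|}~\"“”’".toList

def pvFlush (toks : List (List Char)) (buf : List Char) : List (List Char) :=
  if buf.isEmpty then toks else toks ++ [buf]

def pvScan : List Char → List Char → List (List Char) → List (List Char)
  | [], buf, toks => pvFlush toks buf
  | c :: rest, buf, toks =>
    if PySem.Chars.isspace c || pvSeps.contains c then
      pvScan rest [] (pvFlush toks buf)
    else if pvPunctTok.contains c then
      pvScan rest [] (pvFlush toks buf ++ [[c]])
    else
      pvScan rest (buf ++ [c]) toks

def preprocess_and_split_to_tokens_alt (sentences : List String) : List (List String) :=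
  sentences.map (fun s => (pvScan (PySem.Chars.lower s.toList) [] []).map String.ofList)

-- ===== PRECONDITION & SPEC =====
def Spec_preprocess_and_split_to_tokens (sentences : List String) (out : List (List String)) : Prop := out = preprocess_and_split_to_tokens_alt sentences
instance (sentences : List String) (out : List (List String)) : Decidable (Spec_preprocess_and_split_to_tokens sentences out) := by unfold Spec_preprocess_and_split_to_tokens; infer_instance

-- ===== CLAIM (what is proved, stated in full; the proofs are below) =====
def Claim_equal_preprocess_and_split_to_tokens : Prop := ∀ (sentences : List String), Dom_preprocess_and_split_to_tokens sentences → Spec_preprocess_and_split_to_tokens sentences (preprocess_and_split_to_tokens sentences)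

-- ===== LEMMAS AND PROOFS =====
set_option maxRecDepth 100000

-- characters the domain admits
def allowedCodes : List Nat := List.range' 32 95 ++ [9, 10, 13]
def allowedChars : List Char := allowedCodes.map Char.ofNat

-- per-character expansion performed by A's replace pipeline
def pvE (c : Char) : List Char := cleanSpecialChars [c]

-- the whole pipeline as one fold over (pattern, replacement) steps
def pvSteps : List (List Char × List Char) :=
  pyPunct.map (fun p => ([p], [' ', p, ' '])) ++ pyMapping
def runSteps (ss : List (List Char × List Char)) (t : List Char) : List Char :=
  ss.foldl (fun t pr => PySem.Chars.replace t pr.1 pr.2) t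

lemma replace_go_single (p : Char) (new : List Char) :
    ∀ (l : List Char) (fuel : Nat) (acc : List Char), l.length ≤ fuel →
    PySem.Chars.replace.go [p] new fuel l acc
      = acc.reverse ++ l.flatMap (fun c => if c = p then new else [c]) := by
  intro l
  induction l with
  | nil =>
    intro fuel acc _
    cases fuel <;> simp [PySem.Chars.replace.go]
  | cons c t ih =>
    intro fuel acc hf
    cases fuel with
    | zero => simp at hf
    | succ n =>
      by_cases hc : c = p
      · subst hc
        have hpre : [c].isPrefixOf (c :: t) = true := by simp [List.isPrefixOf]
        simp only [PySem.Chars.replace.go, hpre, if_true, List.length_cons, List.length_nil,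
          Nat.zero_add, List.drop_succ_cons, List.drop_zero]
        rw [ih n (new.reverse ++ acc) (by simpa using Nat.le_of_succ_le_succ hf)]
        simp
      · have hpre : [p].isPrefixOf (c :: t) = false := by
          simp [List.isPrefixOf]
          exact fun h => absurd h.symm hc
        simp only [PySem.Chars.replace.go, hpre, Bool.false_eq_true, if_false]
        rw [ih n (c :: acc) (by simpa using Nat.le_of_succ_le_succ hf)]
        simp [hc]

lemma replace_single (p : Char) (new s : List Char) :
    PySem.Chars.replace s [p] new = s.flatMap (fun c => if c = p then new else [c]) := by
  have h := replace_go_single p new s s.length [] le_rfl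
  simpa [PySem.Chars.replace] using h

lemma clean_eq_run (t : List Char) : cleanSpecialChars t = runSteps pvSteps t := by
  simp [cleanSpecialChars, runSteps, pvSteps, List.foldl_append, List.foldl_map]

lemma steps_single : ∀ pr ∈ pvSteps, pr.1.length = 1 := by decide

lemma run_hom : ∀ (ss : List (List Char × List Char)), (∀ pr ∈ ss, pr.1.length = 1) →
    ∀ a b, runSteps ss (a ++ b) = runSteps ss a ++ runSteps ss b := by
  intro ss
  induction ss with
  | nil => intro _ a b; simp [runSteps]
  | cons pr ss ih =>
    intro h a b
    obtain ⟨p, hp⟩ : ∃ p, pr.1 = [p] := by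
      have := h pr (by simp)
      cases hpr : pr.1 with
      | nil => simp [hpr] at this
      | cons x xs => cases xs with
        | nil => exact ⟨x, rfl⟩
        | cons y ys => simp [hpr] at this
    simp only [runSteps, List.foldl_cons]
    rw [hp, replace_single, replace_single, replace_single, List.flatMap_append]
    exact ih (fun q hq => h q (by simp [hq])) _ _

lemma run_nil (ss : List (List Char × List Char)) (h : ∀ pr ∈ ss, pr.1.length = 1) :
    runSteps ss [] = [] := by
  induction ss with
  | nil => rfl
  | cons pr ss ih =>
    obtain ⟨p, hp⟩ : ∃ p, pr.1 = [p] := by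
      have := h pr (by simp)
      cases hpr : pr.1 with
      | nil => simp [hpr] at this
      | cons x xs => cases xs with
        | nil => exact ⟨x, rfl⟩
        | cons y ys => simp [hpr] at this
    simp only [runSteps, List.foldl_cons]
    rw [hp, replace_single]
    exact ih (fun q hq => h q (by simp [hq]))

lemma clean_flat (l : List Char) : cleanSpecialChars l = l.flatMap pvE := by
  induction l with
  | nil => rw [clean_eq_run, List.flatMap_nil]; exact run_nil pvSteps steps_single
  | cons c t ih =>
    have h : (c :: t) = [c] ++ t := rfl
    rw [h, clean_eq_run, run_hom pvSteps steps_single [c] t]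
    simp only [List.flatMap_cons, List.flatMap_append]
    rw [← clean_eq_run, ← clean_eq_run]
    simp only [pvE]
    rw [ih]
    simp

-- decidable per-character facts
def pvEcheck (c : Char) : Bool :=
  if pvSeps.contains c then
    (pvE c == List.replicate 3 ' ') || (pvE c == List.replicate 5 ' ')
  else if pvPunctTok.contains c then
    (pvE c == [' ', c, ' ']) || (pvE c == [' ', ' ', c, ' ', ' '])
  else pvE c == [c]

lemma echeck_all : allowedChars.all pvEcheck = true := by decide
lemma punct_not_space : pvPunctTok.all (fun c => !PySem.Chars.isspace c) = true := by decide
lemma seps_not_space : pvSeps.all (fun c => !PySem.Chars.isspace c) = true := by decide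
lemma lower_allowed : allowedChars.all (fun c => allowedChars.contains (PySem.Chars.lowerChar c)) = true := by decide

lemma allowed_mem (c : Char) (h : pvDomChar c = true) : c ∈ allowedChars := by
  have hc : c.toNat ∈ allowedCodes := by
    simp only [pvDomChar, Bool.or_eq_true, Bool.and_eq_true, decide_eq_true_eq, beq_iff_eq] at h
    simp only [allowedCodes, List.mem_append, List.mem_range'_1, List.mem_cons, List.mem_singleton,
      List.not_mem_nil]
    omega
  have hofn : Char.ofNat c.toNat = c := Char.ofNat_toNat c
  exact hofn ▸ List.mem_map_of_mem hc

-- split₀.go step facts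
lemma go_space (c : Char) (hc : PySem.Chars.isspace c = true) (rest cur : List Char) (acc : List (List Char)) :
    PySem.Chars.split₀.go (c :: rest) cur acc
      = PySem.Chars.split₀.go rest [] (if cur.isEmpty then acc else cur.reverse :: acc) := by
  by_cases h : cur.isEmpty <;> simp [PySem.Chars.split₀.go, hc, h]

lemma go_space_empty (c : Char) (hc : PySem.Chars.isspace c = true) (rest : List Char) (acc : List (List Char)) :
    PySem.Chars.split₀.go (c :: rest) [] acc = PySem.Chars.split₀.go rest [] acc := by
  simp [PySem.Chars.split₀.go, hc]

lemma go_space_flush (c : Char) (hc : PySem.Chars.isspace c = true) (rest : List Char) (d : Char)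
    (cur : List Char) (acc : List (List Char)) :
    PySem.Chars.split₀.go (c :: rest) (d :: cur) acc
      = PySem.Chars.split₀.go rest [] ((d :: cur).reverse :: acc) := by
  simp [PySem.Chars.split₀.go, hc]

lemma go_nonspace (c : Char) (hc : PySem.Chars.isspace c = false) (rest cur : List Char) (acc : List (List Char)) :
    PySem.Chars.split₀.go (c :: rest) cur acc = PySem.Chars.split₀.go rest (c :: cur) acc := by
  simp [PySem.Chars.split₀.go, hc]

lemma go_nil (cur : List Char) (acc : List (List Char)) :
    PySem.Chars.split₀.go [] cur acc
      = if cur.isEmpty then acc.reverse else (cur.reverse :: acc).reverse := by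
  by_cases h : cur.isEmpty <;> simp [PySem.Chars.split₀.go, h]

lemma flush_reverse (toks : List (List Char)) (buf : List Char) :
    (pvFlush toks buf).reverse
      = if buf.reverse.isEmpty then toks.reverse else buf.reverse.reverse :: toks.reverse := by
  by_cases h : buf.isEmpty
  · simp [pvFlush, h, List.isEmpty_iff.mp h]
  · simp [pvFlush, h]

lemma space_isspace : PySem.Chars.isspace ' ' = true := by decide

lemma go_spaces : ∀ (n : Nat) (rest : List Char) (acc : List (List Char)),
    PySem.Chars.split₀.go (List.replicate n ' ' ++ rest) [] acc
      = PySem.Chars.split₀.go rest [] acc := by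
  intro n
  induction n with
  | zero => intro rest acc; rfl
  | succ m ihm =>
    intro rest acc
    rw [List.replicate_succ, List.cons_append, go_space_empty ' ' space_isspace]
    exact ihm rest acc

lemma scan_main : ∀ (l buf : List Char) (acc : List (List Char)),
    (∀ c ∈ l, c ∈ allowedChars) →
    PySem.Chars.split₀.go (l.flatMap pvE) buf.reverse acc.reverse = pvScan l buf acc := by
  intro l
  induction l with
  | nil =>
    intro buf acc _
    rw [List.flatMap_nil, go_nil]
    by_cases h : buf.isEmpty
    · simp [pvScan, pvFlush, h, List.isEmpty_iff.mp h]
    · simp [pvScan, pvFlush, h]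
  | cons c t ih =>
    intro buf acc hall
    have hc : c ∈ allowedChars := hall c (by simp)
    have ht : ∀ d ∈ t, d ∈ allowedChars := fun d hd => hall d (by simp [hd])
    have hcheck : pvEcheck c = true := List.all_eq_true.mp echeck_all c hc
    have hflush : ((if buf.reverse.isEmpty then acc.reverse else buf.reverse.reverse :: acc.reverse) : List (List Char)) = (pvFlush acc buf).reverse := (flush_reverse acc buf).symm
    rw [List.flatMap_cons]
    by_cases hsep : pvSeps.contains c = true
    · -- separator: pvE c is a run of spaces
      have hsepm : c ∈ pvSeps := by simpa using hsep
      have hsp : PySem.Chars.isspace c = false := by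
        have := List.all_eq_true.mp seps_not_space c hsepm
        simpa using this
      have hE : pvE c = [' ', ' ', ' '] ∨ pvE c = [' ', ' ', ' ', ' ', ' '] := by
        simpa [pvEcheck, hsepm] using hcheck
      have hscan : pvScan (c :: t) buf acc = pvScan t [] (pvFlush acc buf) := by
        simp [pvScan, hsp, hsepm]
      have step : ∀ n : Nat,
          PySem.Chars.split₀.go (List.replicate (n + 1) ' ' ++ t.flatMap pvE) buf.reverse acc.reverse
            = pvScan t [] (pvFlush acc buf) := by
        intro n
        rw [List.replicate_succ, List.cons_append, go_space ' ' space_isspace, hflush,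
          go_spaces n _ _]
        exact ih [] (pvFlush acc buf) ht
      rcases hE with h3 | h5
      · rw [hscan, h3,
          show (([' ', ' ', ' '] : List Char)) = List.replicate 3 ' ' from rfl]
        exact step 2
      · rw [hscan, h5,
          show (([' ', ' ', ' ', ' ', ' '] : List Char)) = List.replicate 5 ' ' from rfl]
        exact step 4
    · by_cases hpk : pvPunctTok.contains c = true
      · -- standalone punctuation token
        have hpkm : c ∈ pvPunctTok := by simpa using hpk
        have hsepm : c ∉ pvSeps := by simpa using hsep
        have hsp : PySem.Chars.isspace c = false := by
          have := List.all_eq_true.mp punct_not_space c hpkm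
          simpa using this
        have hsep0 : pvSeps.contains c = false := by simpa using hsep
        have hE : pvE c = [' ', c, ' '] ∨ pvE c = [' ', ' ', c, ' ', ' '] := by
          simpa [pvEcheck, hsepm, hpkm] using hcheck
        have hscan : pvScan (c :: t) buf acc = pvScan t [] (pvFlush acc buf ++ [[c]]) := by
          simp [pvScan, hsp, hsepm, hpkm]
        have hrev : (([c] : List Char) :: (pvFlush acc buf).reverse) = (pvFlush acc buf ++ [[c]]).reverse := by simp
        rcases hE with h1 | h2
        · rw [hscan, h1]
          rw [show (([' ', c, ' '] : List Char) ++ t.flatMap pvE) = ' ' :: (c :: (' ' :: t.flatMap pvE)) from rfl]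
          rw [go_space ' ' space_isspace, hflush, go_nonspace c hsp,
            go_space_flush ' ' space_isspace _ c []]
          rw [show ((c :: ([] : List Char)).reverse :: (pvFlush acc buf).reverse) = (pvFlush acc buf ++ [[c]]).reverse by simp]
          exact ih [] (pvFlush acc buf ++ [[c]]) ht
        · rw [hscan, h2]
          rw [show (([' ', ' ', c, ' ', ' '] : List Char) ++ t.flatMap pvE) = ' ' :: (' ' :: (c :: (' ' :: (' ' :: t.flatMap pvE)))) from rfl]
          rw [go_space ' ' space_isspace, hflush, go_space_empty ' ' space_isspace,
            go_nonspace c hsp, go_space_flush ' ' space_isspace _ c [],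
            go_space_empty ' ' space_isspace]
          rw [show ((c :: ([] : List Char)).reverse :: (pvFlush acc buf).reverse) = (pvFlush acc buf ++ [[c]]).reverse by simp]
          exact ih [] (pvFlush acc buf ++ [[c]]) ht
      · -- ordinary character (space or word char): pvE c = [c]
        have hsep0 : pvSeps.contains c = false := by simpa using hsep
        have hpk0 : pvPunctTok.contains c = false := by simpa using hpk
        have hsepm : c ∉ pvSeps := by simpa using hsep
        have hpkm : c ∉ pvPunctTok := by simpa using hpk
        have hE : pvE c = [c] := by
          simpa [pvEcheck, hsepm, hpkm] using hcheck
        rw [hE]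
        by_cases hsp : PySem.Chars.isspace c = true
        · have hscan : pvScan (c :: t) buf acc = pvScan t [] (pvFlush acc buf) := by
            simp [pvScan, hsp]
          rw [hscan, List.singleton_append, go_space c hsp, hflush]
          exact ih [] (pvFlush acc buf) ht
        · have hsp' : PySem.Chars.isspace c = false := by simpa using hsp
          have hscan : pvScan (c :: t) buf acc = pvScan t (buf ++ [c]) acc := by
            simp [pvScan, hsp', hsepm, hpkm]
          rw [hscan, List.singleton_append, go_nonspace c hsp']
          rw [show (c :: buf.reverse) = (buf ++ [c]).reverse by simp]
          exact ih (buf ++ [c]) acc ht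

lemma per_sentence (s : String) (hdom : pvDomStr s = true) :
    PySem.Chars.split₀ (cleanSpecialChars (PySem.Chars.lower s.toList))
      = pvScan (PySem.Chars.lower s.toList) [] [] := by
  have hall : ∀ c ∈ PySem.Chars.lower s.toList, c ∈ allowedChars := by
    intro c hcl
    simp only [PySem.Chars.lower, List.mem_map] at hcl
    obtain ⟨d, hd, rfl⟩ := hcl
    have hdall : d ∈ allowedChars := allowed_mem d (List.all_eq_true.mp hdom d hd)
    have := List.all_eq_true.mp lower_allowed d hdall
    simpa [List.contains_iff_mem] using this
  rw [clean_flat]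
  have := scan_main (PySem.Chars.lower s.toList) [] [] hall
  simpa [PySem.Chars.split₀] using this

-- ===== VERDICT (by name: the statement is the Claim_ definition above) =====
theorem preprocess_and_split_to_tokens_spec : Claim_equal_preprocess_and_split_to_tokens := by
  intro sentences hdom
  unfold Spec_preprocess_and_split_to_tokens
  unfold preprocess_and_split_to_tokens preprocess_and_split_to_tokens_alt
  rw [PySem.List.foldl_append_singleton_eq_map]
  refine List.map_congr_left ?_
  intro s hs
  rw [per_sentence s (List.all_eq_true.mp (by exact hdom) s hs)]
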